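-- pv_equiv track=rewrite | github.com/liskos/ovsynnikov | variant_16/22.py | f
-- ===== SOURCE A (Python) =====
-- def f(x):
--     s = 0
--     while x > 0:
--         if x % 2 > 0:
--             s = s + (x % 7)
--         else:
--             s = s - (x % 7)
--         x = x // 7
--     return s
-- ===== SOURCE B (Python) =====
-- def f(x):
--     # Collect base-7 digits (low to high), then sweep from the most
--     # significant digit down, maintaining the running suffix parity of
--     # the digits: 7 is odd, so that parity equals the parity of the
--     # intermediate quotient, which decides each digit's sign.
--     digits = []
--     while x > 0:
--         digits.append(x % 7)
--         x //= 7
--     s = 0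
--     p = 0
--     for d in reversed(digits):
--         p = (p + d) % 2
--         s = s + d if p == 1 else s - d
--     return s
-- ===== Notes on version B (the rewrite author's own statement) =====
-- stated objective: alternative
-- what changed: Instead of testing the parity of the shrinking quotient at each division step, B first extracts the base-7 digit list and then signs each digit in one sweep from the most significant end using the running suffix parity of the digits (valid since 7 is odd).
import Mathlib
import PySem

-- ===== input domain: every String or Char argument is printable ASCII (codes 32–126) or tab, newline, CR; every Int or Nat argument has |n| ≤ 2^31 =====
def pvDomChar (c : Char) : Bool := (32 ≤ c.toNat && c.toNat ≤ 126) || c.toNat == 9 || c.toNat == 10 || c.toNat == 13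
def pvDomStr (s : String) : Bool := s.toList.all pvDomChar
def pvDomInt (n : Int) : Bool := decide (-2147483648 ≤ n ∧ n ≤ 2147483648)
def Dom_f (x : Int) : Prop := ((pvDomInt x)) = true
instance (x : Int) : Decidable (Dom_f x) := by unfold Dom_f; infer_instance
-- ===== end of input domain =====

-- B replaces the per-step parity test on the shrinking quotient by a digit-list
-- extraction plus one suffix-parity sweep (alternative decomposition, same cost).

-- ===== PORT A =====
-- the while loop, with accumulator s, transliterated as tail recursion
def fLoop (x s : Int) : Int :=
  if _h : x > 0 then
    fLoop (PySem.Int.floordiv x 7)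
      (if PySem.Int.mod x 2 > 0 then s + PySem.Int.mod x 7 else s - PySem.Int.mod x 7)
  else s
termination_by x.toNat
decreasing_by
  rw [PySem.Int.floordiv_eq_ediv_of_pos (by norm_num : (0:Int) < 7)]
  omega

def f (x : Int) : Int := fLoop x 0

-- ===== PORT B =====
-- the first while loop of B: base-7 digits, least significant first
def digits7 (x : Int) : List Int :=
  if _h : x > 0 then PySem.Int.mod x 7 :: digits7 (PySem.Int.floordiv x 7) else []
termination_by x.toNat
decreasing_by
  rw [PySem.Int.floordiv_eq_ediv_of_pos (by norm_num : (0:Int) < 7)]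
  omega

-- the body of B's for loop over reversed(digits), state (s, p)
def sweepStep (sp : Int × Int) (d : Int) : Int × Int :=
  let p := PySem.Int.mod (sp.2 + d) 2
  (if p == 1 then sp.1 + d else sp.1 - d, p)

def f_alt (x : Int) : Int := ((digits7 x).reverse.foldl sweepStep (0, 0)).1

-- ===== PRECONDITION & SPEC =====
def Spec_f (x : Int) (out : Int) : Prop := out = f_alt x
instance (x : Int) (out : Int) : Decidable (Spec_f x out) := by unfold Spec_f; infer_instance

-- ===== CLAIM (what is proved, stated in full; the proofs are below) =====
def Claim_equal_f : Prop := ∀ (x : Int), Dom_f x → Spec_f x (f x)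

-- ===== LEMMAS AND PROOFS =====

-- accumulator-free value of A's loop
def g (x : Int) : Int :=
  if _h : x > 0 then
    (if PySem.Int.mod x 2 > 0 then PySem.Int.mod x 7 else -(PySem.Int.mod x 7)) + g (PySem.Int.floordiv x 7)
  else 0
termination_by x.toNat
decreasing_by
  rw [PySem.Int.floordiv_eq_ediv_of_pos (by norm_num : (0:Int) < 7)]
  omega

theorem fLoop_eq_add_g (x s : Int) : fLoop x s = s + g x := by
  induction x, s using fLoop.induct with
  | case1 x s h ih =>
    simp only [dite_eq_ite] at ih
    rw [fLoop, g, dif_pos h, dif_pos h, ih]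
    split_ifs <;> ring
  | case2 x s h =>
    rw [fLoop, g, dif_neg h, dif_neg h]; ring

theorem digits_sweep (y : Int) (hy : 0 ≤ y) :
    (digits7 y).reverse.foldl sweepStep (0, 0) = (g y, PySem.Int.mod y 2) := by
  induction y using digits7.induct with
  | case1 y h ih =>
    have h7 : (0:Int) < 7 := by norm_num
    have h2 : (0:Int) < 2 := by norm_num
    have hy7 : 0 ≤ PySem.Int.floordiv y 7 := by
      rw [PySem.Int.floordiv_eq_ediv_of_pos h7]; omega
    rw [digits7, dif_pos h, List.reverse_cons, List.foldl_append, ih hy7]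
    conv_rhs => rw [g, dif_pos h]
    simp only [List.foldl_cons, List.foldl_nil, sweepStep]
    rw [PySem.Int.mod_eq_emod_of_pos h2, PySem.Int.mod_eq_emod_of_pos h2,
        PySem.Int.mod_eq_emod_of_pos h2, PySem.Int.mod_eq_emod_of_pos h7,
        PySem.Int.floordiv_eq_ediv_of_pos h7]
    have hpar : (y / 7 % 2 + y % 7) % 2 = y % 2 := by omega
    rw [hpar]
    have : (y % 2 == 1) = decide (y % 2 > 0) := by
      rcases Int.emod_two_eq y with h' | h' <;> simp [h']
    simp only [this]
    split_ifs with h1 h2' <;> simp_all <;> ring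
  | case2 y h =>
    have hy0 : y = 0 := by omega
    subst hy0
    rw [digits7, g, dif_neg h, dif_neg h]
    simp [PySem.Int.mod]

-- ===== VERDICT (by name: the statement is the Claim_ definition above) =====
theorem f_spec : Claim_equal_f := by
  intro x _
  unfold Spec_f f f_alt
  rw [fLoop_eq_add_g, zero_add]
  by_cases hx : 0 ≤ x
  · rw [digits_sweep x hx]
  · rw [digits7, g, dif_neg (by omega), dif_neg (by omega)]
    simp
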